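-- pv_equiv track=rewrite | github.com/Bayrakt4rdem/Codebase_Analyzer_v2 | test_complexity_samples.py | while_with_conditionals
-- ===== SOURCE A (Python) =====
-- def while_with_conditionals(x):
--     """While loop with conditionals."""
--     result = 0
--     while x > 0:
--         if x % 2 == 0:
--             result += x
--         elif x % 3 == 0:
--             result += x * 2
--         x -= 1
--     return result
-- ===== SOURCE B (Python) =====
-- def while_with_conditionals(x):
--     """Closed-form O(1): evens up to x sum to m*(m+1) with m = x//2;
--     odd multiples of 3 up to x are 3,9,... (t of them, t = (x//3 + 1)//2),
--     summing to 3*t*t, counted twice."""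
--     if x <= 0:
--         return 0
--     m = x // 2
--     t = (x // 3 + 1) // 2
--     return m * (m + 1) + 6 * t * t
-- ===== Notes on version B (the rewrite author's own statement) =====
-- stated objective: faster
-- what changed: Replaced the O(x) decrementing while-loop with a closed-form arithmetic-series formula for the sum of evens plus twice the odd multiples of 3.
import Mathlib
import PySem

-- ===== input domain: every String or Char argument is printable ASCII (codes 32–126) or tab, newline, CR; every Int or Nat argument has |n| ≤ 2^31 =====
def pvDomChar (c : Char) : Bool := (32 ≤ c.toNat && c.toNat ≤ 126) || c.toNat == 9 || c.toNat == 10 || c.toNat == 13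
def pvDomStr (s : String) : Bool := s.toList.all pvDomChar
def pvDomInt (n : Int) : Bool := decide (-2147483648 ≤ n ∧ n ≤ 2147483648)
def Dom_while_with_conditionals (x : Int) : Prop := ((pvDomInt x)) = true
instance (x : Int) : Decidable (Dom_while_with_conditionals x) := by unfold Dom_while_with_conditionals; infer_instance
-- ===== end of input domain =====

-- B replaces A's O(x) while-loop by a closed-form arithmetic-series formula (objective: faster).

-- ===== PORT A =====
-- the 'while x > 0' loop of A, carrying (x, result)
def pvLoopA (x result : Int) : Int :=
  if 0 < x then
    pvLoopA (x - 1)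
      (if PySem.Int.mod x 2 = 0 then result + x
       else if PySem.Int.mod x 3 = 0 then result + x * 2
       else result)
  else result
termination_by x.toNat
decreasing_by omega

def while_with_conditionals (x : Int) : Int := pvLoopA x 0

-- ===== PORT B =====
def while_with_conditionals_alt (x : Int) : Int :=
  if x ≤ 0 then 0
  else
    let m := PySem.Int.floordiv x 2
    let t := PySem.Int.floordiv (PySem.Int.floordiv x 3 + 1) 2
    m * (m + 1) + 6 * t * t

-- ===== PRECONDITION & SPEC =====
def Spec_while_with_conditionals (x : Int) (out : Int) : Prop := out = while_with_conditionals_alt x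
instance (x : Int) (out : Int) : Decidable (Spec_while_with_conditionals x out) := by unfold Spec_while_with_conditionals; infer_instance

-- ===== CLAIM (what is proved, stated in full; the proofs are below) =====
def Claim_equal_while_with_conditionals : Prop := ∀ (x : Int), Dom_while_with_conditionals x → Spec_while_with_conditionals x (while_with_conditionals x)

-- ===== LEMMAS AND PROOFS =====

-- the closed form, written with Lean's ediv (= Python // for positive divisors)
def pvF (x : Int) : Int :=
  (x / 2) * (x / 2 + 1) + 6 * ((x / 3 + 1) / 2) * ((x / 3 + 1) / 2)

lemma pvAlt_eq_F (x : Int) : while_with_conditionals_alt x = if 0 < x then pvF x else 0 := by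
  unfold while_with_conditionals_alt pvF
  rcases lt_or_ge 0 x with h | h
  · simp only [if_neg (by omega : ¬ x ≤ 0), if_pos h,
      PySem.Int.floordiv_eq_ediv_of_pos (a := x) (by norm_num : (0:Int) < 2),
      PySem.Int.floordiv_eq_ediv_of_pos (a := x) (by norm_num : (0:Int) < 3),
      PySem.Int.floordiv_eq_ediv_of_pos (by norm_num : (0:Int) < 2)]
  · simp [if_pos (by omega : x ≤ 0), if_neg (by omega : ¬ 0 < x)]

-- one loop step of the closed form
lemma pvF_step (x : Int) (hx : 0 < x) :
    pvF x = (if x % 2 = 0 then x else if x % 3 = 0 then x * 2 else 0)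
      + (if 0 < x - 1 then pvF (x - 1) else 0) := by
  have hF0 : (if 0 < x - 1 then pvF (x - 1) else 0) = pvF (x - 1) := by
    rcases lt_or_ge 0 (x - 1) with h | h
    · rw [if_pos h]
    · have hx1 : x = 1 := by omega
      subst hx1; norm_num [pvF]
  rw [hF0]
  unfold pvF
  have hr0 : 0 ≤ x % 6 := by omega
  have hr6 : x % 6 < 6 := by omega
  set r := x % 6 with hr
  interval_cases r
  · -- x ≡ 0 [6], even
    obtain ⟨k, hk⟩ : ∃ k, x = 6 * k := ⟨x / 6, by omega⟩
    rw [if_pos (by omega : x % 2 = 0),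
        (by omega : x / 2 = 3 * k), (by omega : (x / 3 + 1) / 2 = k),
        (by omega : (x - 1) / 2 = 3 * k - 1), (by omega : ((x - 1) / 3 + 1) / 2 = k), hk]
    ring
  · -- x ≡ 1 [6], odd, not a multiple of 3
    obtain ⟨k, hk⟩ : ∃ k, x = 6 * k + 1 := ⟨x / 6, by omega⟩
    rw [if_neg (by omega : ¬ x % 2 = 0), if_neg (by omega : ¬ x % 3 = 0),
        (by omega : x / 2 = 3 * k), (by omega : (x / 3 + 1) / 2 = k),
        (by omega : (x - 1) / 2 = 3 * k), (by omega : ((x - 1) / 3 + 1) / 2 = k)]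
    ring
  · -- x ≡ 2 [6], even
    obtain ⟨k, hk⟩ : ∃ k, x = 6 * k + 2 := ⟨x / 6, by omega⟩
    rw [if_pos (by omega : x % 2 = 0),
        (by omega : x / 2 = 3 * k + 1), (by omega : (x / 3 + 1) / 2 = k),
        (by omega : (x - 1) / 2 = 3 * k), (by omega : ((x - 1) / 3 + 1) / 2 = k), hk]
    ring
  · -- x ≡ 3 [6], odd multiple of 3
    obtain ⟨k, hk⟩ : ∃ k, x = 6 * k + 3 := ⟨x / 6, by omega⟩
    rw [if_neg (by omega : ¬ x % 2 = 0), if_pos (by omega : x % 3 = 0),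
        (by omega : x / 2 = 3 * k + 1), (by omega : (x / 3 + 1) / 2 = k + 1),
        (by omega : (x - 1) / 2 = 3 * k + 1), (by omega : ((x - 1) / 3 + 1) / 2 = k), hk]
    ring
  · -- x ≡ 4 [6], even
    obtain ⟨k, hk⟩ : ∃ k, x = 6 * k + 4 := ⟨x / 6, by omega⟩
    rw [if_pos (by omega : x % 2 = 0),
        (by omega : x / 2 = 3 * k + 2), (by omega : (x / 3 + 1) / 2 = k + 1),
        (by omega : (x - 1) / 2 = 3 * k + 1), (by omega : ((x - 1) / 3 + 1) / 2 = k + 1), hk]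
    ring
  · -- x ≡ 5 [6], odd, not a multiple of 3
    obtain ⟨k, hk⟩ : ∃ k, x = 6 * k + 5 := ⟨x / 6, by omega⟩
    rw [if_neg (by omega : ¬ x % 2 = 0), if_neg (by omega : ¬ x % 3 = 0),
        (by omega : x / 2 = 3 * k + 2), (by omega : (x / 3 + 1) / 2 = k + 1),
        (by omega : (x - 1) / 2 = 3 * k + 2), (by omega : ((x - 1) / 3 + 1) / 2 = k + 1)]
    ring

lemma pvLoopA_eq (n : Nat) : ∀ (x result : Int), x.toNat = n →
    pvLoopA x result = result + (if 0 < x then pvF x else 0) := by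
  induction n with
  | zero =>
    intro x result hx
    rw [pvLoopA]
    rw [if_neg (by omega : ¬ 0 < x), if_neg (by omega : ¬ 0 < x)]
    omega
  | succ n ih =>
    intro x result hx
    have hxpos : 0 < x := by omega
    rw [pvLoopA, if_pos hxpos, ih (x - 1) _ (by omega), if_pos hxpos, pvF_step x hxpos]
    have h2 : PySem.Int.mod x 2 = x % 2 :=
      PySem.Int.mod_eq_emod_of_pos (by norm_num)
    have h3 : PySem.Int.mod x 3 = x % 3 :=
      PySem.Int.mod_eq_emod_of_pos (by norm_num)
    rw [h2, h3]
    split_ifs <;> ring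

-- ===== VERDICT (by name: the statement is the Claim_ definition above) =====
theorem while_with_conditionals_spec : Claim_equal_while_with_conditionals := by
  intro x _
  show while_with_conditionals x = while_with_conditionals_alt x
  rw [while_with_conditionals, pvLoopA_eq x.toNat x 0 rfl, pvAlt_eq_F, zero_add]
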